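-- pv_equiv track=rewrite | github.com/JakobSar/GameTheoryApp | backend/app/exercises.py | strictly_dominant_col
-- ===== SOURCE A (Python) =====
-- def strictly_dominant_col(
--     payoff_map: dict[tuple[str, str], tuple[int, int]], rows: list[str], cols: list[str]
-- ) -> str | None:
--     for c in cols:
--         ok = True
--         for c2 in cols:
--             if c2 == c:
--                 continue
--             if not all(payoff_map[(r, c)][1] > payoff_map[(r, c2)][1] for r in rows):
--                 ok = False
--                 break
--         if ok:
--             return c
--     return None
-- ===== SOURCE B (Python) =====
-- def _beats(payoff_map, rows, c, c2):
--     # c's payoff strictly larger than c2's in every row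
--     return all(payoff_map[(r, c)][1] > payoff_map[(r, c2)][1] for r in rows)
--
--
-- def strictly_dominant_col(payoff_map, rows, cols):
--     if not cols:
--         return None
--     # candidate elimination: anything the candidate fails to beat replaces it
--     candidate = cols[0]
--     for c in cols[1:]:
--         if not _beats(payoff_map, rows, candidate, c):
--             candidate = c
--     # one verification pass over the other columns
--     if all(_beats(payoff_map, rows, candidate, c) for c in cols if c != candidate):
--         return candidate
--     return None
-- ===== Notes on version B (the rewrite author's own statement) =====
-- stated objective: alternative
-- what changed: Replaces A's per-column check against every other column (worst-case O(C^2*R) comparisons) by a candidate-elimination tournament: one pass keeps the only column that could dominate, one verification pass confirms it (O(C*R) worst case); Pre_ excludes inputs with a (row,col) key missing from payoff_map (beyond the no-row / at-most-one-column cases, where neither program reads the map): there B reads keys that A's short-circuiting may skip, so B can raise KeyError where A returns or returns None.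
-- outside the precondition, e.g. on strictly_dominant_col({}, ['r'], ['a', 'a']): A returns 'a', B raises KeyError
import Mathlib
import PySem

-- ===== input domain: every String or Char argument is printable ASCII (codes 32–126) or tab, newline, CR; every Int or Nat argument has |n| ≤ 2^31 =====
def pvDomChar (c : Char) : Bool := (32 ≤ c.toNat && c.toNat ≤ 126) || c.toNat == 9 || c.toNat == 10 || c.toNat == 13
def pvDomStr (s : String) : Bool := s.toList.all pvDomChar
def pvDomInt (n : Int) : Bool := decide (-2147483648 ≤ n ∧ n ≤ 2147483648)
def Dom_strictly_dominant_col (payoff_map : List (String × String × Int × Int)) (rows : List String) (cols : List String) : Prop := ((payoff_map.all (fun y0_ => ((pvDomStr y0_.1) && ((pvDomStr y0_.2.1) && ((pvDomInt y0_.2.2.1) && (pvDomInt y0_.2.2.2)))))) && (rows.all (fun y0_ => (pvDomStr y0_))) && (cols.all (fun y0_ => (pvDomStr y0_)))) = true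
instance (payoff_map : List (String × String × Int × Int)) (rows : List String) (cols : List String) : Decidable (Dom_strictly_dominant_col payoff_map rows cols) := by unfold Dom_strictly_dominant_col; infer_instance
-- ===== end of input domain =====

-- B replaces A's per-column check against every other column by a candidate-elimination
-- tournament plus one verification pass; Pre_ excludes missing-key inputs, where the
-- Pythons' dict reads differ.

-- payoff_map[(r, c)][1]; total with default 0, exact whenever the key is present (Pre_).
def pvVal (payoff_map : List (String × String × Int × Int)) (r c : String) : Int :=
  (((payoff_map.find? (fun e => e.1 == r && e.2.1 == c)).map (fun e => e.2.2.2)).getD 0)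

-- ===== PORT A =====
-- inner 'for c2 … break' = short-circuit all over cols
def pvOkA (payoff_map : List (String × String × Int × Int)) (rows cols : List String) (c : String) : Bool :=
  cols.all (fun c2 => c2 == c || rows.all (fun r => pvVal payoff_map r c > pvVal payoff_map r c2))

-- outer 'for c in cols: … return c'
def pvLoopA (payoff_map : List (String × String × Int × Int)) (rows cols : List String) : List String → Option String
  | [] => none
  | c :: rest => if pvOkA payoff_map rows cols c then some c else pvLoopA payoff_map rows cols rest

def strictly_dominant_col (payoff_map : List (String × String × Int × Int)) (rows : List String) (cols : List String) : Option String :=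
  pvLoopA payoff_map rows cols cols

-- ===== PORT B =====
-- _beats: c's payoff strictly larger than c2's in every row
def pvBeats (payoff_map : List (String × String × Int × Int)) (rows : List String) (c c2 : String) : Bool :=
  rows.all (fun r => pvVal payoff_map r c > pvVal payoff_map r c2)

-- 'for c in cols[1:]: if not _beats(candidate, c): candidate = c'
def pvElim (payoff_map : List (String × String × Int × Int)) (rows : List String) : String → List String → String
  | cand, [] => cand
  | cand, c :: rest =>
    if ! pvBeats payoff_map rows cand c then pvElim payoff_map rows c rest
    else pvElim payoff_map rows cand rest

def strictly_dominant_col_alt (payoff_map : List (String × String × Int × Int)) (rows : List String) (cols : List String) : Option String :=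
  match cols with
  | [] => none
  | c0 :: rest =>
    let candidate := pvElim payoff_map rows c0 rest
    if ((c0 :: rest).filter (fun c => c != candidate)).all (fun c => pvBeats payoff_map rows candidate c)
    then some candidate
    else none

-- ===== PRECONDITION & SPEC =====
-- Pre_ excludes inputs with a (row, col) key missing from payoff_map, beyond the no-row /
-- at-most-one-column cases in which neither Python reads the map: on missing-key inputs the
-- Pythons' dict reads differ (B reads keys A's short-circuiting may skip), so B can raise
-- KeyError where A returns, and A itself raises KeyError on most of them.
def Pre_strictly_dominant_col (payoff_map : List (String × String × Int × Int)) (rows : List String) (cols : List String) : Prop :=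
  rows = [] ∨ cols.length ≤ 1 ∨
    ∀ r ∈ rows, ∀ c ∈ cols, (payoff_map.find? (fun e => e.1 == r && e.2.1 == c)).isSome
instance (payoff_map : List (String × String × Int × Int)) (rows : List String) (cols : List String) : Decidable (Pre_strictly_dominant_col payoff_map rows cols) := by unfold Pre_strictly_dominant_col; infer_instance

def pvWitness_strictly_dominant_col : (List (String × String × Int × Int)) × List String × List String :=
  ([("r", "a", 0, 1), ("r", "b", 0, 0)], ["r"], ["a", "b"])

def Spec_strictly_dominant_col (payoff_map : List (String × String × Int × Int)) (rows : List String) (cols : List String) (out : Option String) : Prop := out = strictly_dominant_col_alt payoff_map rows cols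
instance (payoff_map : List (String × String × Int × Int)) (rows : List String) (cols : List String) (out : Option String) : Decidable (Spec_strictly_dominant_col payoff_map rows cols out) := by unfold Spec_strictly_dominant_col; infer_instance

-- ===== CLAIM (what is proved, stated in full; the proofs are below) =====
def Claim_equal_strictly_dominant_col : Prop := ∀ (payoff_map : List (String × String × Int × Int)) (rows : List String) (cols : List String), Dom_strictly_dominant_col payoff_map rows cols → Pre_strictly_dominant_col payoff_map rows cols → Spec_strictly_dominant_col payoff_map rows cols (strictly_dominant_col payoff_map rows cols)

-- ===== LEMMAS AND PROOFS =====
-- (the ports are total over pvVal, so the equivalence below in fact never needs the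
--  Pre_ hypothesis; Pre_'s role is to exclude the inputs on which the Pythons raise)

-- 'c strictly dominates every other column of cols on every row' — what A's inner loops test
def pvStrDom (payoff_map : List (String × String × Int × Int)) (rows cols : List String) (c : String) : Prop :=
  ∀ c2 ∈ cols, c2 ≠ c → ∀ r ∈ rows, pvVal payoff_map r c2 < pvVal payoff_map r c

theorem beats_iff (payoff_map : List (String × String × Int × Int)) (rows : List String) (c c2 : String) :
    pvBeats payoff_map rows c c2 = true ↔ ∀ r ∈ rows, pvVal payoff_map r c2 < pvVal payoff_map r c := by
  simp [pvBeats, List.all_eq_true]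

theorem beats_self_false (payoff_map : List (String × String × Int × Int)) (r0 : String) (rs : List String) (x : String) :
    pvBeats payoff_map (r0 :: rs) x x = false := by
  simp [pvBeats]

theorem beats_asymm (payoff_map : List (String × String × Int × Int)) (r0 : String) (rs : List String) (x y : String)
    (h : pvBeats payoff_map (r0 :: rs) x y = true) :
    pvBeats payoff_map (r0 :: rs) y x = false := by
  rw [beats_iff] at h
  have hx := h r0 List.mem_cons_self
  rw [← Bool.not_eq_true, beats_iff]
  intro hy
  exact absurd (hy r0 List.mem_cons_self) (not_lt.mpr (le_of_lt hx))

theorem okA_iff (payoff_map : List (String × String × Int × Int)) (rows cols : List String) (c : String) :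
    pvOkA payoff_map rows cols c = true ↔ pvStrDom payoff_map rows cols c := by
  simp [pvOkA, pvStrDom, List.all_eq_true, or_iff_not_imp_left]

theorem verif_iff (payoff_map : List (String × String × Int × Int)) (rows cols : List String) (cand : String) :
    ((cols.filter (fun c => c != cand)).all (fun c => pvBeats payoff_map rows cand c) = true) ↔
      pvStrDom payoff_map rows cols cand := by
  simp [pvStrDom, List.all_eq_true, pvBeats, or_iff_not_imp_left]

theorem loopA_eq_find? (payoff_map : List (String × String × Int × Int)) (rows cols : List String) (l : List String) :
    pvLoopA payoff_map rows cols l = l.find? (pvOkA payoff_map rows cols) := by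
  induction l with
  | nil => rfl
  | cons a l ih =>
    cases h : pvOkA payoff_map rows cols a <;> simp [pvLoopA, h, ih]

theorem find?_eq_some_unique {α : Type} (p : α → Bool) (l : List α) (b : α)
    (hb : b ∈ l) (hp : p b = true) (huniq : ∀ c ∈ l, p c = true → c = b) :
    l.find? p = some b := by
  induction l with
  | nil => cases hb
  | cons a l ih =>
    by_cases ha : p a = true
    · have : a = b := huniq a (List.mem_cons_self) ha
      simp [this, hp]
    · have hbl : b ∈ l := by
        rcases List.mem_cons.mp hb with h | h
        · exact absurd (h ▸ hp) ha
        · exact h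
      simp only [List.find?_cons]
      rw [Bool.eq_false_iff.mpr ha]
      exact ih hbl (fun c hc h => huniq c (List.mem_cons_of_mem _ hc) h)

-- the elimination pass always returns the initial candidate or a list element
theorem elim_mem (payoff_map : List (String × String × Int × Int)) (rows : List String) :
    ∀ (l : List String) (cand : String), pvElim payoff_map rows cand l = cand ∨ pvElim payoff_map rows cand l ∈ l := by
  intro l
  induction l with
  | nil => intro cand; exact Or.inl rfl
  | cons c rest ih =>
    intro cand
    simp only [pvElim]
    by_cases h : pvBeats payoff_map rows cand c = true
    · rw [if_neg (by simp [h])]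
      rcases ih cand with h' | h'
      · exact Or.inl h'
      · exact Or.inr (List.mem_cons_of_mem _ h')
    · rw [if_pos (by simp [Bool.not_eq_true] at h ⊢; exact h)]
      rcases ih c with h' | h'
      · exact Or.inr (by rw [h']; exact List.mem_cons_self)
      · exact Or.inr (List.mem_cons_of_mem _ h')

-- with no rows every _beats is vacuously true, so the candidate never changes
theorem elim_rows_nil (payoff_map : List (String × String × Int × Int)) :
    ∀ (l : List String) (cand : String), pvElim payoff_map [] cand l = cand := by
  intro l
  induction l with
  | nil => intro cand; rfl
  | cons c rest ih =>
    intro cand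
    simp only [pvElim, pvBeats, List.all_nil, Bool.not_true, Bool.false_eq_true, if_false]
    exact ih cand

-- if a column d beats every other name in play, the elimination pass ends on d
theorem elim_reaches_dom (payoff_map : List (String × String × Int × Int)) (r0 : String) (rs : List String) (d : String) :
    ∀ (l : List String) (cand : String),
    (d = cand ∨ d ∈ l) →
    (∀ x, (x = cand ∨ x ∈ l) → x ≠ d → pvBeats payoff_map (r0 :: rs) d x = true) →
    pvElim payoff_map (r0 :: rs) cand l = d := by
  intro l
  induction l with
  | nil =>
    intro cand hd _
    rcases hd with hd | hd
    · exact hd.symm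
    · cases hd
  | cons c rest ih =>
    intro cand hd hbeats
    have wkc : ∀ x, x = c ∨ x ∈ rest → x = cand ∨ x ∈ c :: rest := by
      intro x hx
      rcases hx with h | h
      · exact Or.inr (by rw [h]; exact List.mem_cons_self)
      · exact Or.inr (List.mem_cons_of_mem _ h)
    have wkcand : ∀ x, x = cand ∨ x ∈ rest → x = cand ∨ x ∈ c :: rest := by
      intro x hx
      rcases hx with h | h
      · exact Or.inl h
      · exact Or.inr (List.mem_cons_of_mem _ h)
    simp only [pvElim]
    by_cases hcd : cand = d
    · -- the candidate is already d; it survives this step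
      by_cases hc : c = d
      · -- duplicate of d arrives: _beats(d, d) is false, so candidate := c = d
        have hb : pvBeats payoff_map (r0 :: rs) cand c = false := by
          rw [hcd, hc]; exact beats_self_false payoff_map r0 rs d
        rw [if_pos (by rw [hb]; rfl)]
        exact ih c (Or.inl hc.symm) (fun x hx hxd => hbeats x (wkc x hx) hxd)
      · have hb : pvBeats payoff_map (r0 :: rs) cand c = true := by
          rw [hcd]; exact hbeats c (Or.inr List.mem_cons_self) hc
        rw [if_neg (by rw [hb]; simp)]
        exact ih cand (Or.inl hcd.symm) (fun x hx hxd => hbeats x (wkcand x hx) hxd)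
    · -- the candidate is not d, so d is still ahead
      by_cases hc : c = d
      · -- d arrives and eliminates the candidate
        have hdc : pvBeats payoff_map (r0 :: rs) d cand = true :=
          hbeats cand (Or.inl rfl) (fun h => hcd h)
        have hb : pvBeats payoff_map (r0 :: rs) cand c = false := by
          rw [hc]; exact beats_asymm payoff_map r0 rs d cand hdc
        rw [if_pos (by rw [hb]; rfl)]
        exact ih c (Or.inl hc.symm) (fun x hx hxd => hbeats x (wkc x hx) hxd)
      · have hdrest : d ∈ rest := by
          rcases hd with h | h
          · exact absurd h.symm hcd
          · rcases List.mem_cons.mp h with h' | h'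
            · exact absurd h'.symm hc
            · exact h'
        by_cases hb : pvBeats payoff_map (r0 :: rs) cand c = true
        · rw [if_neg (by rw [hb]; simp)]
          exact ih cand (Or.inr hdrest) (fun x hx hxd => hbeats x (wkcand x hx) hxd)
        · rw [if_pos (by simp [Bool.not_eq_true] at hb ⊢; exact hb)]
          exact ih c (Or.inr hdrest) (fun x hx hxd => hbeats x (wkc x hx) hxd)

-- a strictly dominant column is unique by name (given at least one row)
theorem strdom_unique (payoff_map : List (String × String × Int × Int)) (r0 : String) (rs cols : List String)
    (c d : String) (hc : c ∈ cols) (hd : d ∈ cols)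
    (hcdom : pvStrDom payoff_map (r0 :: rs) cols c) (hddom : pvStrDom payoff_map (r0 :: rs) cols d) : c = d := by
  by_contra hne
  have h1 := hcdom d hd (fun h => hne h.symm) r0 List.mem_cons_self
  have h2 := hddom c hc hne r0 List.mem_cons_self
  exact absurd h1 (not_lt.mpr (le_of_lt h2))

-- ===== VERDICT (by name: the statement is the Claim_ definition above) =====
theorem strictly_dominant_col_spec : Claim_equal_strictly_dominant_col := by
  intro payoff_map rows cols _ _
  unfold Spec_strictly_dominant_col
  cases cols with
  | nil => rfl
  | cons c0 cs =>
    cases rows with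
    | nil =>
      -- no rows: every comparison is vacuously true on both sides
      have hA : pvOkA payoff_map [] (c0 :: cs) c0 = true := by simp [pvOkA]
      have hv : ((c0 :: cs).filter (fun c => c != c0)).all (fun c => pvBeats payoff_map [] c0 c) = true := by
        simp [pvBeats]
      simp only [strictly_dominant_col, strictly_dominant_col_alt, pvLoopA, hA, if_true,
        elim_rows_nil, hv]
    | cons r0 rs =>
      rw [strictly_dominant_col, loopA_eq_find?]
      have halt : strictly_dominant_col_alt payoff_map (r0 :: rs) (c0 :: cs) =
          (if ((c0 :: cs).filter (fun c => c != pvElim payoff_map (r0 :: rs) c0 cs)).all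
                (fun c => pvBeats payoff_map (r0 :: rs) (pvElim payoff_map (r0 :: rs) c0 cs) c)
           then some (pvElim payoff_map (r0 :: rs) c0 cs) else none) := rfl
      rw [halt]
      by_cases hex : ∃ d ∈ c0 :: cs, pvStrDom payoff_map (r0 :: rs) (c0 :: cs) d
      · obtain ⟨d, hdm, hdom⟩ := hex
        -- A finds exactly d (the dominant column is unique by name)
        have hfind : (c0 :: cs).find? (pvOkA payoff_map (r0 :: rs) (c0 :: cs)) = some d := by
          apply find?_eq_some_unique _ _ _ hdm ((okA_iff _ _ _ _).mpr hdom)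
          intro c hc hpc
          exact strdom_unique payoff_map r0 rs (c0 :: cs) c d hc hdm ((okA_iff _ _ _ _).mp hpc) hdom
        -- B's elimination pass ends on d and the verification passes
        have hcand : pvElim payoff_map (r0 :: rs) c0 cs = d := by
          apply elim_reaches_dom payoff_map r0 rs d cs c0
          · rcases List.mem_cons.mp hdm with h | h
            · exact Or.inl h
            · exact Or.inr h
          · intro x hx hxd
            rw [beats_iff]
            intro r hr
            apply hdom x _ hxd r hr
            rcases hx with h | h
            · exact (by rw [h]; exact List.mem_cons_self)
            · exact List.mem_cons_of_mem _ h
        rw [hfind, hcand, if_pos ((verif_iff payoff_map (r0 :: rs) (c0 :: cs) d).mpr hdom)]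
      · -- no dominant column: A's scan and B's verification both come up empty
        have hnone : (c0 :: cs).find? (pvOkA payoff_map (r0 :: rs) (c0 :: cs)) = none := by
          rw [List.find?_eq_none]
          intro c hc hpc
          exact hex ⟨c, hc, (okA_iff _ _ _ _).mp hpc⟩
        rw [hnone, if_neg ?_]
        intro hv
        apply hex
        refine ⟨pvElim payoff_map (r0 :: rs) c0 cs, ?_, (verif_iff _ _ _ _).mp hv⟩
        rcases elim_mem payoff_map (r0 :: rs) cs c0 with h | h
        · exact (by rw [h]; exact List.mem_cons_self)
        · exact List.mem_cons_of_mem _ h
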